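-- pv_equiv track=rewrite | github.com/earthai-tech/fusionlab-learn | fusionlab/tools/app/geoprior/ui/map/plot_utils.py | pick_obs_col
-- ===== SOURCE A (Python) =====
-- from typing import Optional, Tuple, Iterable
--
-- def pick_obs_col(cols: Optional[Iterable[object]]) -> str:
--     """
--     Heuristic: try to find an observed/true column.
--
--     Examples it may match:
--     - *_obs, *_true, *_target
--     - *_subsidence
--     """
--     cands = ["obs", "true", "target", "y", "subsidence"]
--
--     cols_iter = cols if cols is not None else []
--     low = {str(c).lower(): str(c) for c in cols_iter}
--
--     for k in cands:
--         suf = f"_{k}"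
--         for name, orig in low.items():
--             if name.endswith(suf):
--                 return orig
--     return ""
-- ===== SOURCE B (Python) =====
-- def _rank(name, cands):
--     for i, k in enumerate(cands):
--         if name.endswith("_" + k):
--             return i
--     return len(cands)
--
-- def pick_obs_col(cols):
--     cands = ["obs", "true", "target", "y", "subsidence"]
--     low = {str(c).lower(): str(c) for c in (cols if cols is not None else [])}
--     best_rank, best = len(cands), ""
--     for name, orig in low.items():
--         r = _rank(name, cands)
--         if r < best_rank:
--             best_rank, best = r, orig
--     return best
-- ===== Notes on version B (the rewrite author's own statement) =====
-- stated objective: alternative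
-- what changed: A loops over candidate suffixes and rescans the columns for each; B makes a single argmin pass over the columns, computing each column's candidate rank once and keeping the first column with the strictly smallest rank.
import Mathlib
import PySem

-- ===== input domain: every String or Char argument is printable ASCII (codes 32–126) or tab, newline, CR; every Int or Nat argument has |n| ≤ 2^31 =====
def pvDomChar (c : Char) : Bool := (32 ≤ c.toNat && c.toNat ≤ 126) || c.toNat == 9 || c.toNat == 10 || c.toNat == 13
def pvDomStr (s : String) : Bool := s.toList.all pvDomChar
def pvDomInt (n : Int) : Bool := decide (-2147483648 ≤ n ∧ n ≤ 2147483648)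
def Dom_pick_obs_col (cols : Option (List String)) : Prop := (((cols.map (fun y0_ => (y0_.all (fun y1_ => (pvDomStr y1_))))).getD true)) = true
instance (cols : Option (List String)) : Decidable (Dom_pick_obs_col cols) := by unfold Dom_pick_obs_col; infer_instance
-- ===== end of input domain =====

-- B replaces A's per-candidate rescan of the columns by a single argmin pass: each
-- column gets a candidate rank and the first column with the minimal rank wins
-- (alternative decomposition, same asymptotic cost).


-- ===== PORT A =====
def pick_obs_col (cols : Option (List String)) : String :=
  let cands : List String := ["obs", "true", "target", "y", "subsidence"]
  let cols_iter := cols.getD []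
  let low : PySem.Dict String String :=
    cols_iter.foldl (fun d c => d.insert (PySem.Str.lower c) c) PySem.Dict.empty
  -- for k in cands: for (name, orig) in low.items(): if name.endswith(f"_{k}"): return orig
  (cands.findSome? (fun k =>
      (low.items.find? (fun p => PySem.Str.endswith p.1 ("_" ++ k))).map (·.2))).getD ""

-- ===== PORT B =====
-- _rank(name, cands): index of the first candidate whose "_k" is a suffix of name, else len(cands)
def pvRankAux (name : String) : List String → Nat → Nat
  | [], i => i
  | k :: ks, i => if PySem.Str.endswith name ("_" ++ k) then i else pvRankAux name ks (i + 1)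

def pick_obs_col_alt (cols : Option (List String)) : String :=
  let cands : List String := ["obs", "true", "target", "y", "subsidence"]
  let low : PySem.Dict String String :=
    (cols.getD []).foldl (fun d c => d.insert (PySem.Str.lower c) c) PySem.Dict.empty
  -- single pass: keep the first (name, orig) with the strictly smallest rank
  let best : Nat × String :=
    low.items.foldl (fun b p =>
      if pvRankAux p.1 cands 0 < b.1 then (pvRankAux p.1 cands 0, p.2) else b)
      (cands.length, "")
  best.2

-- ===== PRECONDITION & SPEC =====
def Spec_pick_obs_col (cols : Option (List String)) (out : String) : Prop := out = pick_obs_col_alt cols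
instance (cols : Option (List String)) (out : String) : Decidable (Spec_pick_obs_col cols out) := by unfold Spec_pick_obs_col; infer_instance

-- ===== CLAIM (what is proved, stated in full; the proofs are below) =====
def Claim_equal_pick_obs_col : Prop := ∀ (cols : Option (List String)), Dom_pick_obs_col cols → Spec_pick_obs_col cols (pick_obs_col cols)

-- ===== LEMMAS AND PROOFS =====

theorem pvRankAux_succ (name : String) (ks : List String) (i : Nat) :
    pvRankAux name ks (i + 1) = pvRankAux name ks i + 1 := by
  induction ks generalizing i with
  | nil => rfl
  | cons k ks ih =>
    simp only [pvRankAux]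
    split_ifs
    · rfl
    · exact ih (i + 1)

theorem pvRankAux_cons_eq_zero (name k : String) (ks : List String) :
    ((pvRankAux name (k :: ks) 0) == 0) = PySem.Str.endswith name ("_" ++ k) := by
  simp only [pvRankAux]
  by_cases h : PySem.Str.endswith name ("_" ++ k) = true
  · rw [if_pos h, h]; rfl
  · rw [Bool.not_eq_true] at h
    rw [if_neg (by rw [h]; exact Bool.false_ne_true), pvRankAux_succ, h]
    simp

theorem foldl_best_zero (ks : List String) (L : List (String × String)) (v : String) :
    L.foldl (fun b p => if pvRankAux p.1 ks 0 < b.1 then (pvRankAux p.1 ks 0, p.2) else b)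
      ((0 : Nat), v) = (0, v) := by
  induction L with
  | nil => rfl
  | cons p L ih => simpa using ih

theorem foldl_best_find_zero (ks : List String) (L : List (String × String))
    (b : Nat) (v : String) (p₀ : String × String)
    (hb : 0 < b) (hf : L.find? (fun p => pvRankAux p.1 ks 0 == 0) = some p₀) :
    L.foldl (fun b p => if pvRankAux p.1 ks 0 < b.1 then (pvRankAux p.1 ks 0, p.2) else b)
      (b, v) = (0, p₀.2) := by
  induction L generalizing b v with
  | nil => simp at hf
  | cons q L ih =>
    rw [List.foldl_cons]
    cases hq : (pvRankAux q.1 ks 0 == 0) with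
    | true =>
      simp only [List.find?_cons, hq] at hf
      injection hf with hf
      have hq' : pvRankAux q.1 ks 0 = 0 := by simpa using hq
      rw [show (if pvRankAux q.1 ks 0 < (b, v).1 then (pvRankAux q.1 ks 0, q.2) else (b, v))
            = ((0 : Nat), q.2) by simp [hq', hb], ← hf]
      exact foldl_best_zero ks L q.2
    | false =>
      simp only [List.find?_cons, hq] at hf
      have hq' : pvRankAux q.1 ks 0 ≠ 0 := by simpa using hq
      split_ifs with hlt
      · exact ih (pvRankAux q.1 ks 0) q.2 (Nat.pos_of_ne_zero hq') hf
      · exact ih b v hb hf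

theorem foldl_best_shift (ks : List String) (L : List (String × String))
    (b : Nat) (v : String) :
    L.foldl (fun b p =>
        if pvRankAux p.1 ks 0 + 1 < b.1 then (pvRankAux p.1 ks 0 + 1, p.2) else b)
      (b + 1, v)
      = ((L.foldl (fun b p =>
            if pvRankAux p.1 ks 0 < b.1 then (pvRankAux p.1 ks 0, p.2) else b) (b, v)).1 + 1,
         (L.foldl (fun b p =>
            if pvRankAux p.1 ks 0 < b.1 then (pvRankAux p.1 ks 0, p.2) else b) (b, v)).2) := by
  induction L generalizing b v with
  | nil => rfl
  | cons q L ih =>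
    simp only [List.foldl_cons]
    by_cases hlt : pvRankAux q.1 ks 0 < b
    · rw [show (if pvRankAux q.1 ks 0 + 1 < (b + 1, v).1 then (pvRankAux q.1 ks 0 + 1, q.2)
            else (b + 1, v)) = (pvRankAux q.1 ks 0 + 1, q.2) by simp [hlt],
          show (if pvRankAux q.1 ks 0 < (b, v).1 then (pvRankAux q.1 ks 0, q.2) else (b, v))
            = (pvRankAux q.1 ks 0, q.2) by simp [hlt]]
      exact ih (pvRankAux q.1 ks 0) q.2
    · rw [show (if pvRankAux q.1 ks 0 + 1 < (b + 1, v).1 then (pvRankAux q.1 ks 0 + 1, q.2)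
            else (b + 1, v)) = (b + 1, v) by simp [hlt],
          show (if pvRankAux q.1 ks 0 < (b, v).1 then (pvRankAux q.1 ks 0, q.2) else (b, v))
            = (b, v) by simp [hlt]]
      exact ih b v

theorem priority_eq_argmin (ks : List String) (L : List (String × String)) :
    (ks.findSome? (fun k =>
        (L.find? (fun p => PySem.Str.endswith p.1 ("_" ++ k))).map (·.2))).getD ""
      = (L.foldl (fun b p =>
            if pvRankAux p.1 ks 0 < b.1 then (pvRankAux p.1 ks 0, p.2) else b)
          (ks.length, "")).2 := by
  induction ks generalizing L with
  | nil =>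
    rw [show (([] : List String).length) = 0 from rfl, foldl_best_zero [] L ""]
    rfl
  | cons k ks ih =>
    cases hf : L.find? (fun p => PySem.Str.endswith p.1 ("_" ++ k)) with
    | some p₀ =>
      have hz : L.find? (fun p => pvRankAux p.1 (k :: ks) 0 == 0) = some p₀ := by
        rw [show (fun p : String × String => pvRankAux p.1 (k :: ks) 0 == 0)
              = (fun p : String × String => PySem.Str.endswith p.1 ("_" ++ k)) from
            funext (fun p => pvRankAux_cons_eq_zero p.1 k ks)]
        exact hf
      rw [foldl_best_find_zero (k :: ks) L (k :: ks).length "" p₀ (Nat.succ_pos _) hz,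
        List.findSome?_cons, hf]
      rfl
    | none =>
      have hno : ∀ p ∈ L, PySem.Str.endswith p.1 ("_" ++ k) = false :=
        fun p hp => by simpa using List.find?_eq_none.mp hf p hp
      have hcong : L.foldl (fun b p =>
            if pvRankAux p.1 (k :: ks) 0 < b.1 then (pvRankAux p.1 (k :: ks) 0, p.2) else b)
            ((k :: ks).length, "")
          = L.foldl (fun b p =>
            if pvRankAux p.1 ks 0 + 1 < b.1 then (pvRankAux p.1 ks 0 + 1, p.2) else b)
            (ks.length + 1, "") := by
        apply PySem.List.foldl_congr_mem
        intro acc p hp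
        have hr : pvRankAux p.1 (k :: ks) 0 = pvRankAux p.1 ks 0 + 1 := by
          simp only [pvRankAux, hno p hp, Bool.false_eq_true, if_false]
          exact pvRankAux_succ p.1 ks 0
        rw [hr]
      rw [hcong, foldl_best_shift ks L ks.length "", List.findSome?_cons, hf]
      exact ih L

-- ===== VERDICT (by name: the statement is the Claim_ definition above) =====
theorem pick_obs_col_spec : Claim_equal_pick_obs_col := by
  intro cols _
  unfold Spec_pick_obs_col pick_obs_col pick_obs_col_alt
  exact priority_eq_argmin _ _
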